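-- pv_equiv track=rewrite | github.com/haileykr/Algorithm-Study | programmers/PG_92334_신고결과받기.py | solution
-- ===== SOURCE A (Python) =====
-- def solution(id_list, report, k):
--     report_sets = {}
--     answer = {}
--     for id_name in id_list:
--         answer[id_name] = 0
--         report_sets[id_name] = set()
--     for report_detail in report:
--         [reporter, reportee] = report_detail.split(" ")
--         report_sets[reportee].add(reporter)
--
--     for report_sets_item in list(report_sets.values()):
--         if len(report_sets_item) >= k:
--             for reportee in report_sets_item:
--                 answer[reportee] += 1
--
--     return list(answer.values())
-- ===== SOURCE B (Python) =====
-- def solution(id_list, report, k):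
--     # Different decomposition: deduplicate reports into a set of (reporter, reportee)
--     # pairs, count distinct reporters per reportee with a flat int counter, then a
--     # single pass over the deduplicated pairs credits each reporter of a banned user.
--     pairs = set()
--     for r in report:
--         reporter, reportee = r.split(" ")
--         pairs.add((reporter, reportee))
--
--     cnt = {i: 0 for i in id_list}
--     for reporter, reportee in pairs:
--         cnt[reportee] += 1
--
--     answer = {i: 0 for i in id_list}
--     for reporter, reportee in pairs:
--         if cnt[reportee] >= k:
--             answer[reporter] += 1
--
--     return list(answer.values())
-- ===== Notes on version B (the rewrite author's own statement) =====
-- stated objective: alternative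
-- what changed: A builds a dict mapping each reportee to a set of its reporters and then runs a nested loop over those sets; B instead deduplicates report into one set of (reporter, reportee) pairs and makes two flat passes over it with plain integer counters (distinct-reporter counts, then credits per reporter).
import Mathlib
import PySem

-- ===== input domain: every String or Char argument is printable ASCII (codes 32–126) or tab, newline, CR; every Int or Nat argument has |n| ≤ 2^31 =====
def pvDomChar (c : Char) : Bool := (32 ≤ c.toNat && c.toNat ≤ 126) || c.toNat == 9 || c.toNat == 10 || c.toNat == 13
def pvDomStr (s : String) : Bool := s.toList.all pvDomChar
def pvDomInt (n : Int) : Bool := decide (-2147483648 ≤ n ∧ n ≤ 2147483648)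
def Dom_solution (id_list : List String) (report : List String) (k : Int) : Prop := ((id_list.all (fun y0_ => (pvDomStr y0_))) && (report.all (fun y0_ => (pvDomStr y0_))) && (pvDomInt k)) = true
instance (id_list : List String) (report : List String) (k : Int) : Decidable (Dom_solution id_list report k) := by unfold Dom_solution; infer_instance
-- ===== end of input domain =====

-- B replaces A's dict-of-reporter-sets with a deduplicated set of (reporter, reportee)
-- pairs and flat integer counters (alternative decomposition; same asymptotic cost).

-- ===== PORT A =====
-- r.split(" ") when it yields exactly two tokens, else none (Python's unpacking ValueError);
-- shared split-and-unpack shape for both ports and for Pre_solution below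
def pvParse (r : String) : Option (String × String) :=
  match PySem.Str.split? r " " with
  | some [a, b] => some (a, b)
  | _ => none

-- Literal port of A.  Python raises where a report does not split into exactly two tokens
-- (ValueError) or references an id outside id_list (KeyError); those inputs are excluded
-- by Pre_solution, and there the port's skip/insert defaults are unclaimed.
def solution (id_list : List String) (report : List String) (k : Int) : List Int :=
  let st := id_list.foldl
    (fun (st : PySem.Dict String Int × PySem.Dict String (PySem.Set String)) id_name =>
      (st.1.insert id_name 0, st.2.insert id_name PySem.Set.empty))
    (PySem.Dict.empty, PySem.Dict.empty)
  let answer := st.1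
  let report_sets := st.2
  let report_sets := report.foldl
    (fun rs report_detail =>
      match PySem.Str.split? report_detail " " with
      | some [reporter, reportee] => rs.modify reportee PySem.Set.empty (fun s => PySem.Set.add s reporter)
      | _ => rs)
    report_sets
  let answer := report_sets.values.foldl
    (fun ans report_sets_item =>
      if k ≤ PySem.Set.len report_sets_item then
        report_sets_item.foldl (fun ans reporter => ans.modify reporter 0 (fun v => v + 1)) ans
      else ans)
    answer
  answer.values

-- ===== PORT B =====
def solution_alt (id_list : List String) (report : List String) (k : Int) : List Int :=
  let pairs : PySem.Set (String × String) :=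
    report.foldl
      (fun s r =>
        match PySem.Str.split? r " " with
        | some [reporter, reportee] => PySem.Set.add s (reporter, reportee)
        | _ => s)
      PySem.Set.empty
  let cnt : PySem.Dict String Int := id_list.foldl (fun d i => d.insert i 0) PySem.Dict.empty
  let cnt := pairs.foldl (fun d p => d.modify p.2 0 (fun v => v + 1)) cnt
  let answer : PySem.Dict String Int := id_list.foldl (fun d i => d.insert i 0) PySem.Dict.empty
  let answer := pairs.foldl
    (fun d p => if k ≤ cnt.getD p.2 0 then d.modify p.1 0 (fun v => v + 1) else d)
    answer
  answer.values

-- ===== PRECONDITION & SPEC =====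
def pvPairs (report : List String) : List (String × String) := report.filterMap pvParse

def pvNRep (report : List String) (e : String) : Nat :=
  ((PySem.Set.ofList (pvPairs report)).filter (fun p => p.2 == e)).length


def pvOk (id_list : List String) (r : String) : Bool :=
  match pvParse r with
  | some p => decide (p.2 ∈ id_list)
  | none => false

def Pre_solution (id_list : List String) (report : List String) (k : Int) : Prop :=
  (report.all (pvOk id_list)
   && (pvPairs report).all
        (fun p => !(decide (k ≤ (pvNRep report p.2 : Int))) || decide (p.1 ∈ id_list))) = true
instance (id_list : List String) (report : List String) (k : Int) : Decidable (Pre_solution id_list report k) := by unfold Pre_solution; infer_instance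

def pvWitness_solution : List String × List String × Int :=
  (["muzi", "frodo", "apeach"], ["muzi frodo", "apeach frodo", "muzi frodo"], 2)

def Spec_solution (id_list : List String) (report : List String) (k : Int) (out : List Int) : Prop := out = solution_alt id_list report k
instance (id_list : List String) (report : List String) (k : Int) (out : List Int) : Decidable (Spec_solution id_list report k out) := by unfold Spec_solution; infer_instance

-- ===== CLAIM (what is proved, stated in full; the proofs are below) =====
def Claim_equal_solution : Prop := ∀ (id_list : List String) (report : List String) (k : Int), Dom_solution id_list report k → Pre_solution id_list report k → Spec_solution id_list report k (solution id_list report k)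

-- ===== LEMMAS AND PROOFS =====

def pvD (id_list : List String) : PySem.Set String := PySem.Set.ofList id_list
def pvQ (report : List String) : PySem.Set (String × String) := PySem.Set.ofList (pvPairs report)
def pvS (report : List String) (e : String) : PySem.Set String :=
  PySem.Set.ofList (((pvPairs report).filter (fun p => p.2 == e)).map (fun p => p.1))

theorem pv_match_eq {σ : Type} (g : σ → String × String → σ) (s : σ) (r : String) :
    (match PySem.Str.split? r " " with
     | some [a, b] => g s (a, b)
     | _ => s)
    = (match pvParse r with | some p => g s p | none => s) := by
  unfold pvParse
  rcases PySem.Str.split? r " " with _ | (_ | ⟨a, _ | ⟨b, _ | ⟨c, t⟩⟩⟩) <;> rfl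

theorem pv_foldl_parse {σ : Type} (g : σ → String × String → σ) :
    ∀ (l : List String) (s : σ),
      l.foldl (fun s r =>
        match PySem.Str.split? r " " with
        | some [a, b] => g s (a, b)
        | _ => s) s
      = (l.filterMap pvParse).foldl g s := by
  intro l
  induction l with
  | nil => intro s; rfl
  | cons r l ih =>
    intro s
    rw [List.foldl_cons, List.filterMap_cons, pv_match_eq g s r]
    cases h : pvParse r with
    | none => simp only [ih]
    | some p => simp only [List.foldl_cons, ih]

theorem pv_getD_init_int : ∀ (l : List String) (d : PySem.Dict String Int),
    (∀ y, d.getD y 0 = 0) → ∀ x, (l.foldl (fun d i => d.insert i 0) d).getD x 0 = 0 := by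
  intro l
  induction l with
  | nil => intro d h x; exact h x
  | cons i l ih =>
    intro d h x
    rw [List.foldl_cons]
    refine ih _ (fun y => ?_) x
    rw [PySem.Dict.getD_insert]
    split <;> simp [h]

theorem pv_getD_init_set : ∀ (l : List String) (d : PySem.Dict String (PySem.Set String)),
    (∀ y, d.getD y PySem.Set.empty = PySem.Set.empty) →
    ∀ x, (l.foldl (fun d i => d.insert i PySem.Set.empty) d).getD x PySem.Set.empty = PySem.Set.empty := by
  intro l
  induction l with
  | nil => intro d h x; exact h x
  | cons i l ih =>
    intro d h x
    rw [List.foldl_cons]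
    refine ih _ (fun y => ?_) x
    rw [PySem.Dict.getD_insert]
    split
    · rfl
    · exact h y

theorem pv_update_absorb {α : Type} [BEq α] [LawfulBEq α] (s : PySem.Set α) (xs : List α)
    (h : ∀ x ∈ xs, x ∈ s) : PySem.Set.update s xs = s := by
  rw [PySem.Set.update_eq_append_filter]
  have hnil : List.filter (fun y => !s.contains y) (PySem.Set.ofList xs) = [] := by
    apply List.filter_eq_nil_iff.mpr
    intro a ha
    have hm : a ∈ s := h a ((PySem.Set.mem_ofList xs a).mp ha)
    simpa using hm
  rw [hnil, List.append_nil]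

theorem pv_rsval : ∀ (L : List (String × String)) (d : PySem.Dict String (PySem.Set String)) (e : String),
    (L.foldl (fun rs p => rs.modify p.2 PySem.Set.empty (fun s => PySem.Set.add s p.1)) d).getD e PySem.Set.empty
    = ((L.filter (fun p => p.2 == e)).map (fun p => p.1)).foldl PySem.Set.add (d.getD e PySem.Set.empty) := by
  intro L
  induction L with
  | nil => intro d e; rfl
  | cons p L ih =>
    intro d e
    rw [List.foldl_cons, List.filter_cons, ih]
    by_cases hpe : p.2 = e
    · simp only [hpe, beq_self_eq_true, if_true, List.map_cons, List.foldl_cons]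
      congr 1
      rw [PySem.Dict.getD_modify]
      simp
    · have : (p.2 == e) = false := by simp [hpe]
      simp only [this]
      congr 1
      rw [PySem.Dict.getD_modify]
      have hep : ¬ e = p.2 := fun h => hpe h.symm
      simp [hep]

theorem pv_nest : ∀ (ss : List (PySem.Set String)) (d : PySem.Dict String Int) (x : String),
    (ss.foldl (fun ans s => s.foldl (fun ans reporter => ans.modify reporter 0 (fun v => v + 1)) ans) d).getD x 0
    = d.getD x 0 + ((ss.map (fun s => ((s.count x : Nat) : Int))).sum) := by
  intro ss
  induction ss with
  | nil => intro d x; simp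
  | cons s ss ih =>
    intro d x
    rw [List.foldl_cons, List.map_cons, List.sum_cons, ih]
    have h := PySem.Dict.getD_foldl_modify_add_one s d x
    rw [h]
    ring

theorem pv_foldl_ite {α β : Type} (p : α → Prop) [DecidablePred p] (f : β → α → β) (l : List α) (d : β) :
    l.foldl (fun d a => if p a then f d a else d) d = (l.filter (fun a => decide (p a))).foldl f d := by
  rw [List.foldl_filter]
  simp only [decide_eq_true_eq]

theorem pv_keysnest : ∀ (ss : List (PySem.Set String)) (d : PySem.Dict String Int),
    (∀ s ∈ ss, ∀ r ∈ s, r ∈ d.keys) →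
    (ss.foldl (fun ans s => s.foldl (fun ans reporter => ans.modify reporter 0 (fun v => v + 1)) ans) d).keys = d.keys := by
  intro ss
  induction ss with
  | nil => intro d _; rfl
  | cons s ss ih =>
    intro d h
    rw [List.foldl_cons]
    have hk : (s.foldl (fun ans reporter => ans.modify reporter 0 (fun v => v + 1)) d).keys = d.keys := by
      have h1 := PySem.Dict.keys_foldl_modify s 0 (fun _ _ v => v + 1) d
      rw [h1, pv_update_absorb _ _ (h s (by simp))]
    rw [ih _ (by intro t ht r hr; rw [hk]; exact h t (by simp [ht]) r hr), hk]

theorem pv_mem_fst_filter (L : List (String × String)) (e a : String) :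
    (a ∈ (L.filter (fun p => p.2 == e)).map (fun p => p.1)) ↔ (a, e) ∈ L := by
  simp only [List.mem_map, List.mem_filter, beq_iff_eq]
  constructor
  · rintro ⟨p, ⟨hp, h2⟩, h1⟩
    have : p = (a, e) := by cases p; simp_all
    rwa [this] at hp
  · intro h
    exact ⟨(a, e), ⟨h, rfl⟩, rfl⟩

theorem pv_mem_S (report : List String) (e x : String) :
    x ∈ pvS report e ↔ (x, e) ∈ pvQ report := by
  unfold pvS pvQ
  rw [PySem.Set.mem_ofList, PySem.Set.mem_ofList, pv_mem_fst_filter]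

theorem pv_lenS (report : List String) (e : String) :
    (pvS report e).length = pvNRep report e := by
  have hnF : ((pvQ report).filter (fun p => p.2 == e)).Nodup :=
    (PySem.Set.nodup_ofList (pvPairs report)).filter _
  have hM : (((pvQ report).filter (fun p => p.2 == e)).map (fun p => p.1)).Nodup := by
    refine List.Nodup.map_on ?_ hnF
    intro p hp q hq hfst
    have hp2 : p.2 = e := by simpa using (List.of_mem_filter hp)
    have hq2 : q.2 = e := by simpa using (List.of_mem_filter hq)
    cases p; cases q; simp_all
  have hperm : ((((pvQ report).filter (fun p => p.2 == e)).map (fun p => p.1))).Perm (pvS report e) := by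
    have hnS : (pvS report e).Nodup := by unfold pvS; exact PySem.Set.nodup_ofList _
    refine (List.perm_ext_iff_of_nodup hM hnS).mpr ?_
    intro a
    rw [pv_mem_fst_filter, pv_mem_S]
  have hlen := hperm.length_eq
  rw [List.length_map] at hlen
  simpa [pvNRep, pvQ] using hlen.symm

theorem pv_count_nodup (s : List String) (hs : s.Nodup) (x : String) :
    (s.count x : Int) = if x ∈ s then 1 else 0 := by
  by_cases h : x ∈ s
  · simp [List.count_eq_one_of_mem hs h, h]
  · simp [List.count_eq_zero_of_not_mem h, h]

theorem pv_main_count (id_list report : List String) (k : Int)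
    (h1 : ∀ p ∈ pvPairs report, p.2 ∈ id_list) (x : String) :
    ((pvD id_list).countP (fun e => decide (x ∈ pvS report e) && decide (k ≤ (pvNRep report e : Int))))
    = ((pvQ report).countP (fun p => p.1 == x && decide (k ≤ (pvNRep report p.2 : Int)))) := by
  rw [List.countP_eq_length_filter, List.countP_eq_length_filter]
  have hndD : (pvD id_list).Nodup := by unfold pvD; exact PySem.Set.nodup_ofList _
  have hndQ : (pvQ report).Nodup := by unfold pvQ; exact PySem.Set.nodup_ofList _
  have hnd1 : ((pvD id_list).filter (fun e => decide (x ∈ pvS report e) && decide (k ≤ (pvNRep report e : Int)))).Nodup := hndD.filter _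
  have hndm : (((pvD id_list).filter (fun e => decide (x ∈ pvS report e) && decide (k ≤ (pvNRep report e : Int)))).map (fun e => (x, e))).Nodup := by
    refine List.Nodup.map_on ?_ hnd1
    intro a _ b _ hab
    simpa using congrArg Prod.snd hab
  have hnd2 : ((pvQ report).filter (fun p => p.1 == x && decide (k ≤ (pvNRep report p.2 : Int)))).Nodup := hndQ.filter _
  have hperm : (((pvD id_list).filter (fun e => decide (x ∈ pvS report e) && decide (k ≤ (pvNRep report e : Int)))).map (fun e => (x, e))).Perm
      ((pvQ report).filter (fun p => p.1 == x && decide (k ≤ (pvNRep report p.2 : Int)))) := by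
    refine (List.perm_ext_iff_of_nodup hndm hnd2).mpr ?_
    rintro ⟨a, e⟩
    simp only [List.mem_map, List.mem_filter, Bool.and_eq_true, decide_eq_true_eq, beq_iff_eq,
      Prod.mk.injEq]
    constructor
    · rintro ⟨e', ⟨he'D, hmem, hk⟩, hxa, rfl⟩
      refine ⟨?_, hxa.symm, hk⟩
      rw [← hxa]
      exact (pv_mem_S report e' x).mp hmem
    · rintro ⟨hQ, rfl, hk⟩
      have hP : (a, e) ∈ pvPairs report := by
        have hq := hQ; unfold pvQ at hq; exact (PySem.Set.mem_ofList _ _).mp hq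
      have heD : e ∈ pvD id_list := by
        unfold pvD; exact (PySem.Set.mem_ofList _ _).mpr (h1 (a, e) hP)
      exact ⟨e, ⟨heD, (pv_mem_S report e a).mpr hQ, hk⟩, rfl, rfl⟩
  have hl := hperm.length_eq
  rwa [List.length_map] at hl

theorem pv_solB (id_list report : List String) (k : Int)
    (h2 : ∀ p ∈ pvPairs report, k ≤ (pvNRep report p.2 : Int) → p.1 ∈ id_list) :
    solution_alt id_list report k
    = (pvD id_list).map (fun x => ((pvQ report).countP (fun p => p.1 == x && decide (k ≤ (pvNRep report p.2 : Int))) : Int)) := by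
  simp only [solution_alt]
  have hpairs : report.foldl
      (fun s r =>
        match PySem.Str.split? r " " with
        | some [reporter, reportee] => PySem.Set.add s (reporter, reportee)
        | _ => s)
      PySem.Set.empty = pvQ report := by
    have h := pv_foldl_parse (fun (s : PySem.Set (String × String)) p => PySem.Set.add s p) report PySem.Set.empty
    rw [h]
    exact (PySem.Set.ofList_eq_foldl (pvPairs report)).symm
  rw [hpairs]
  have hcnt : ∀ e, ((pvQ report).foldl (fun d p => d.modify p.2 0 (fun v => v + 1))
      (id_list.foldl (fun d i => d.insert i 0) PySem.Dict.empty)).getD e 0 = (pvNRep report e : Int) := by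
    intro e
    have hm : (pvQ report).foldl (fun d p => d.modify p.2 0 (fun v => v + 1))
        (id_list.foldl (fun d i => d.insert i 0) PySem.Dict.empty : PySem.Dict String Int)
        = ((pvQ report).map (fun p => p.2)).foldl (fun d x0 => d.modify x0 0 (fun v => v + 1))
          (id_list.foldl (fun d i => d.insert i 0) PySem.Dict.empty : PySem.Dict String Int) :=
      (List.foldl_map (f := fun p : String × String => p.2)
        (g := fun (d : PySem.Dict String Int) x0 => d.modify x0 0 (fun v => v + 1))
        (l := pvQ report) (init := id_list.foldl (fun d i => d.insert i 0) PySem.Dict.empty)).symm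
    rw [hm, PySem.Dict.getD_foldl_modify_add_one]
    rw [pv_getD_init_int id_list PySem.Dict.empty (fun y => rfl) e]
    have hc : List.count e ((pvQ report).map (fun p => p.2))
        = List.countP (fun p => p.2 == e) (pvQ report) := by
      rw [List.count_eq_countP, List.countP_map]
      rfl
    rw [hc]
    simp [pvNRep, pvQ, List.countP_eq_length_filter]
  simp only [hcnt]
  have hflt : (pvQ report).foldl
      (fun d p => if k ≤ ((pvNRep report p.2 : Nat) : Int) then d.modify p.1 0 (fun v => v + 1) else d)
      (id_list.foldl (fun d i => d.insert i 0) PySem.Dict.empty : PySem.Dict String Int)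
      = ((pvQ report).filter (fun p => decide (k ≤ ((pvNRep report p.2 : Nat) : Int)))).foldl
          (fun d p => d.modify p.1 0 (fun v => v + 1))
          (id_list.foldl (fun d i => d.insert i 0) PySem.Dict.empty : PySem.Dict String Int) :=
    pv_foldl_ite (fun p => k ≤ ((pvNRep report p.2 : Nat) : Int))
      (fun (d : PySem.Dict String Int) p => d.modify p.1 0 (fun v => v + 1)) (pvQ report)
      (id_list.foldl (fun d i => d.insert i 0) PySem.Dict.empty)
  rw [hflt]
  have hk0 : (id_list.foldl (fun d i => d.insert i 0) PySem.Dict.empty : PySem.Dict String Int).keys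
      = pvD id_list := by
    have h := PySem.Dict.keys_foldl_insert id_list (fun _ _ => (0 : Int)) PySem.Dict.empty
    simpa [PySem.Dict.keys_empty, PySem.Set.update_nil_left, pvD] using h
  have hmemF : ∀ y ∈ ((pvQ report).filter (fun p => decide (k ≤ ((pvNRep report p.2 : Nat) : Int)))).map
      (fun p => p.1), y ∈ pvD id_list := by
    intro y hy
    rcases List.mem_map.mp hy with ⟨p, hpf, rfl⟩
    have hpQ := List.mem_filter.mp hpf
    have hcond : k ≤ ((pvNRep report p.2 : Nat) : Int) := by simpa using hpQ.2
    have hpP : p ∈ pvPairs report := by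
      have h := hpQ.1; unfold pvQ at h; exact (PySem.Set.mem_ofList _ _).mp h
    unfold pvD
    exact (PySem.Set.mem_ofList _ _).mpr (h2 p hpP hcond)
  have hkeys : (((pvQ report).filter (fun p => decide (k ≤ ((pvNRep report p.2 : Nat) : Int)))).foldl
      (fun d p => d.modify p.1 0 (fun v => v + 1))
      (id_list.foldl (fun d i => d.insert i 0) PySem.Dict.empty : PySem.Dict String Int)).keys
      = pvD id_list := by
    have h := PySem.Dict.keys_foldl_modify_key
      ((pvQ report).filter (fun p => decide (k ≤ ((pvNRep report p.2 : Nat) : Int))))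
      (fun p => p.1) (0 : Int) (fun _ _ v => v + 1)
      ((id_list.foldl (fun d i => d.insert i 0) PySem.Dict.empty : PySem.Dict String Int))
    rw [h, hk0, pv_update_absorb _ _ hmemF]
  have hnodup : (((pvQ report).filter (fun p => decide (k ≤ ((pvNRep report p.2 : Nat) : Int)))).foldl
      (fun d p => d.modify p.1 0 (fun v => v + 1))
      (id_list.foldl (fun d i => d.insert i 0) PySem.Dict.empty : PySem.Dict String Int)).keys.Nodup := by
    rw [hkeys]; unfold pvD; exact PySem.Set.nodup_ofList _
  rw [PySem.Dict.values_eq_map_keys _ hnodup 0, hkeys]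
  refine List.map_congr_left ?_
  intro x _
  have hmf : (((pvQ report).filter (fun p => decide (k ≤ ((pvNRep report p.2 : Nat) : Int)))).foldl
      (fun d p => d.modify p.1 0 (fun v => v + 1))
      (id_list.foldl (fun d i => d.insert i 0) PySem.Dict.empty : PySem.Dict String Int))
      = ((((pvQ report).filter (fun p => decide (k ≤ ((pvNRep report p.2 : Nat) : Int)))).map (fun p => p.1)).foldl
          (fun d x0 => d.modify x0 0 (fun v => v + 1))
          (id_list.foldl (fun d i => d.insert i 0) PySem.Dict.empty : PySem.Dict String Int)) :=
    (List.foldl_map (f := fun p : String × String => p.1)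
      (g := fun (d : PySem.Dict String Int) x0 => d.modify x0 0 (fun v => v + 1))
      (l := (pvQ report).filter (fun p => decide (k ≤ ((pvNRep report p.2 : Nat) : Int))))
      (init := id_list.foldl (fun d i => d.insert i 0) PySem.Dict.empty)).symm
  rw [hmf, PySem.Dict.getD_foldl_modify_add_one]
  rw [pv_getD_init_int id_list PySem.Dict.empty (fun y => rfl) x]
  rw [List.count_eq_countP, List.countP_map]
  rw [show ((fun a => a == x) ∘ fun p : String × String => p.1) = (fun p : String × String => p.1 == x) from rfl]
  rw [List.countP_filter]
  simp

theorem pv_count_nodup2 (s : List String) (hs : s.Nodup) (x : String) :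
    ((s.count x : Nat) : Int) = if decide (x ∈ s) = true then 1 else 0 := by
  rw [pv_count_nodup s hs x]
  by_cases h : x ∈ s <;> simp [h]

theorem pv_solA (id_list report : List String) (k : Int)
    (h1 : ∀ p ∈ pvPairs report, p.2 ∈ id_list)
    (h2 : ∀ p ∈ pvPairs report, k ≤ (pvNRep report p.2 : Int) → p.1 ∈ id_list) :
    solution id_list report k
    = (pvD id_list).map (fun x => ((pvD id_list).countP
        (fun e => decide (x ∈ pvS report e) && decide (k ≤ ((pvNRep report e : Nat) : Int))) : Int)) := by
  simp only [solution]
  have hst : id_list.foldl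
      (fun (st : PySem.Dict String Int × PySem.Dict String (PySem.Set String)) id_name =>
        (st.1.insert id_name 0, st.2.insert id_name PySem.Set.empty))
      (PySem.Dict.empty, PySem.Dict.empty)
      = (id_list.foldl (fun d i => d.insert i (0 : Int)) PySem.Dict.empty,
         id_list.foldl (fun (d : PySem.Dict String (PySem.Set String)) i => d.insert i PySem.Set.empty) PySem.Dict.empty) :=
    PySem.List.foldl_prod_mk (fun (d : PySem.Dict String Int) i => d.insert i 0)
      (fun (d : PySem.Dict String (PySem.Set String)) i => d.insert i PySem.Set.empty)
      id_list PySem.Dict.empty PySem.Dict.empty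
  rw [hst]
  have hrs : report.foldl
      (fun rs report_detail =>
        match PySem.Str.split? report_detail " " with
        | some [reporter, reportee] => rs.modify reportee PySem.Set.empty (fun s => PySem.Set.add s reporter)
        | _ => rs)
      (id_list.foldl (fun (d : PySem.Dict String (PySem.Set String)) i => d.insert i PySem.Set.empty) PySem.Dict.empty)
      = (pvPairs report).foldl
          (fun rs p => rs.modify p.2 PySem.Set.empty (fun s => PySem.Set.add s p.1))
          (id_list.foldl (fun (d : PySem.Dict String (PySem.Set String)) i => d.insert i PySem.Set.empty) PySem.Dict.empty) :=
    pv_foldl_parse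
      (fun (rs : PySem.Dict String (PySem.Set String)) p =>
        rs.modify p.2 PySem.Set.empty (fun s => PySem.Set.add s p.1)) report _
  rw [hrs]
  have hk0s : (id_list.foldl (fun (d : PySem.Dict String (PySem.Set String)) i => d.insert i PySem.Set.empty) PySem.Dict.empty).keys
      = pvD id_list := by
    have h := PySem.Dict.keys_foldl_insert id_list
      (fun (_ : PySem.Dict String (PySem.Set String)) (_ : String) => PySem.Set.empty) PySem.Dict.empty
    simpa [PySem.Dict.keys_empty, PySem.Set.update_nil_left, pvD] using h
  have hkeysRS : ((pvPairs report).foldl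
      (fun rs p => rs.modify p.2 PySem.Set.empty (fun s => PySem.Set.add s p.1))
      (id_list.foldl (fun (d : PySem.Dict String (PySem.Set String)) i => d.insert i PySem.Set.empty) PySem.Dict.empty)).keys
      = pvD id_list := by
    have h := PySem.Dict.keys_foldl_modify_key (pvPairs report) (fun p => p.2) PySem.Set.empty
      (fun (_ : PySem.Dict String (PySem.Set String)) (p : String × String) (s : PySem.Set String) => PySem.Set.add s p.1)
      (id_list.foldl (fun (d : PySem.Dict String (PySem.Set String)) i => d.insert i PySem.Set.empty) PySem.Dict.empty)
    rw [h, hk0s, pv_update_absorb]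
    intro y hy
    rcases List.mem_map.mp hy with ⟨p, hp, rfl⟩
    unfold pvD
    exact (PySem.Set.mem_ofList _ _).mpr (h1 p hp)
  have hndRS : ((pvPairs report).foldl
      (fun rs p => rs.modify p.2 PySem.Set.empty (fun s => PySem.Set.add s p.1))
      (id_list.foldl (fun (d : PySem.Dict String (PySem.Set String)) i => d.insert i PySem.Set.empty) PySem.Dict.empty)).keys.Nodup := by
    rw [hkeysRS]; unfold pvD; exact PySem.Set.nodup_ofList _
  have hgetD : ∀ e, ((pvPairs report).foldl
      (fun rs p => rs.modify p.2 PySem.Set.empty (fun s => PySem.Set.add s p.1))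
      (id_list.foldl (fun (d : PySem.Dict String (PySem.Set String)) i => d.insert i PySem.Set.empty) PySem.Dict.empty)).getD e PySem.Set.empty
      = pvS report e := by
    intro e
    rw [pv_rsval (pvPairs report) _ e]
    rw [pv_getD_init_set id_list PySem.Dict.empty (fun y => rfl) e]
    unfold pvS
    rw [PySem.Set.ofList_eq_foldl]
    rfl
  have hvals : ((pvPairs report).foldl
      (fun rs p => rs.modify p.2 PySem.Set.empty (fun s => PySem.Set.add s p.1))
      (id_list.foldl (fun (d : PySem.Dict String (PySem.Set String)) i => d.insert i PySem.Set.empty) PySem.Dict.empty)).values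
      = (pvD id_list).map (fun e => pvS report e) := by
    rw [PySem.Dict.values_eq_map_keys _ hndRS PySem.Set.empty, hkeysRS]
    exact List.map_congr_left (fun e _ => hgetD e)
  rw [hvals]
  have hflt : ((pvD id_list).map (fun e => pvS report e)).foldl
      (fun ans report_sets_item =>
        if k ≤ PySem.Set.len report_sets_item then
          report_sets_item.foldl (fun ans reporter => ans.modify reporter 0 (fun v => v + 1)) ans
        else ans)
      (id_list.foldl (fun d i => d.insert i (0 : Int)) PySem.Dict.empty)
      = (((pvD id_list).map (fun e => pvS report e)).filter (fun s => decide (k ≤ PySem.Set.len s))).foldl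
          (fun ans s => s.foldl (fun ans reporter => ans.modify reporter 0 (fun v => v + 1)) ans)
          (id_list.foldl (fun d i => d.insert i (0 : Int)) PySem.Dict.empty) :=
    pv_foldl_ite (fun s => k ≤ PySem.Set.len s)
      (fun (ans : PySem.Dict String Int) s =>
        s.foldl (fun ans reporter => ans.modify reporter 0 (fun v => v + 1)) ans)
      ((pvD id_list).map (fun e => pvS report e))
      (id_list.foldl (fun d i => d.insert i (0 : Int)) PySem.Dict.empty)
  rw [hflt, List.filter_map]
  have hlen : ((fun s => decide (k ≤ PySem.Set.len s)) ∘ (fun e => pvS report e))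
      = fun e => decide (k ≤ ((pvNRep report e : Nat) : Int)) := by
    funext e
    simp [Function.comp, PySem.Set.len, pv_lenS]
  rw [hlen]
  have hk0 : (id_list.foldl (fun d i => d.insert i (0 : Int)) PySem.Dict.empty : PySem.Dict String Int).keys
      = pvD id_list := by
    have h := PySem.Dict.keys_foldl_insert id_list (fun _ _ => (0 : Int)) PySem.Dict.empty
    simpa [PySem.Dict.keys_empty, PySem.Set.update_nil_left, pvD] using h
  have hmemss : ∀ s ∈ ((pvD id_list).filter (fun e => decide (k ≤ ((pvNRep report e : Nat) : Int)))).map (fun e => pvS report e),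
      ∀ r ∈ s, r ∈ (id_list.foldl (fun d i => d.insert i (0 : Int)) PySem.Dict.empty : PySem.Dict String Int).keys := by
    intro s hs r hr
    rcases List.mem_map.mp hs with ⟨e, hef, rfl⟩
    have he := List.mem_filter.mp hef
    have hcond : k ≤ ((pvNRep report e : Nat) : Int) := by simpa using he.2
    have hrQ : (r, e) ∈ pvQ report := (pv_mem_S report e r).mp hr
    have hrP : (r, e) ∈ pvPairs report := by
      unfold pvQ at hrQ; exact (PySem.Set.mem_ofList _ _).mp hrQ
    rw [hk0]
    unfold pvD
    exact (PySem.Set.mem_ofList _ _).mpr (h2 (r, e) hrP hcond)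
  have hkeysA := pv_keysnest
    (((pvD id_list).filter (fun e => decide (k ≤ ((pvNRep report e : Nat) : Int)))).map (fun e => pvS report e))
    (id_list.foldl (fun d i => d.insert i (0 : Int)) PySem.Dict.empty) hmemss
  have hndA : ((((pvD id_list).filter (fun e => decide (k ≤ ((pvNRep report e : Nat) : Int)))).map (fun e => pvS report e)).foldl
      (fun ans s => s.foldl (fun ans reporter => ans.modify reporter 0 (fun v => v + 1)) ans)
      (id_list.foldl (fun d i => d.insert i (0 : Int)) PySem.Dict.empty)).keys.Nodup := by
    rw [hkeysA, hk0]; unfold pvD; exact PySem.Set.nodup_ofList _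
  rw [PySem.Dict.values_eq_map_keys _ hndA 0, hkeysA, hk0]
  refine List.map_congr_left ?_
  intro x _
  rw [pv_nest _ _ x]
  rw [pv_getD_init_int id_list PySem.Dict.empty (fun y => rfl) x]
  rw [List.map_map]
  have hfun : ((fun s : PySem.Set String => ((s.count x : Nat) : Int)) ∘ (fun e => pvS report e))
      = fun e => ((pvS report e).count x : Int) := rfl
  rw [hfun]
  have hcongr : ((pvD id_list).filter (fun e => decide (k ≤ ((pvNRep report e : Nat) : Int)))).map
        (fun e => (((pvS report e).count x : Nat) : Int))
      = ((pvD id_list).filter (fun e => decide (k ≤ ((pvNRep report e : Nat) : Int)))).map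
        (fun e => if decide (x ∈ pvS report e) = true then 1 else 0) := by
    refine List.map_congr_left ?_
    intro e _
    exact pv_count_nodup2 (pvS report e) (by unfold pvS; exact PySem.Set.nodup_ofList _) x
  rw [hcongr]
  rw [PySem.List.sum_map_ite_one_zero (fun e => decide (x ∈ pvS report e))]
  rw [List.countP_filter]
  simp

theorem pv_pre_split (id_list report : List String) (k : Int) (h : Pre_solution id_list report k) :
    (∀ p ∈ pvPairs report, p.2 ∈ id_list) ∧
    (∀ p ∈ pvPairs report, k ≤ (pvNRep report p.2 : Int) → p.1 ∈ id_list) := by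
  unfold Pre_solution at h
  rw [Bool.and_eq_true] at h
  obtain ⟨ha, hb⟩ := h
  constructor
  · intro p hp
    rcases List.mem_filterMap.mp hp with ⟨r, hr, hpr⟩
    have hok := List.all_eq_true.mp ha r hr
    unfold pvOk at hok
    rw [hpr] at hok
    exact of_decide_eq_true hok
  · intro p hp hk
    have hc := List.all_eq_true.mp hb p hp
    rw [Bool.or_eq_true] at hc
    rcases hc with hc | hc
    · exfalso
      simp only [Bool.not_eq_true', decide_eq_false_iff_not] at hc
      exact hc hk
    · exact of_decide_eq_true hc

theorem pv_final (id_list report : List String) (k : Int) (hpre : Pre_solution id_list report k) :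
    solution id_list report k = solution_alt id_list report k := by
  obtain ⟨h1, h2⟩ := pv_pre_split id_list report k hpre
  rw [pv_solA id_list report k h1 h2, pv_solB id_list report k h2]
  refine List.map_congr_left ?_
  intro x _
  exact congrArg _ (pv_main_count id_list report k h1 x)

-- ===== VERDICT (by name: the statement is the Claim_ definition above) =====
theorem solution_spec : Claim_equal_solution := by
  intro id_list report k _ hpre
  unfold Spec_solution
  exact pv_final id_list report k hpre
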